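-- pv_equiv track=rewrite | github.com/infernoalert/filefolderanalysis | src/core/results_manager.py | search_companies
-- ===== SOURCE A (Python) =====
-- from typing import Dict, Any, List, Optional, Counter
--
-- def search_companies(companies: Counter, query: str) -> List[tuple]:
--     """
--     Search for companies matching a query
--
--     Args:
--         companies: Counter object with company data
--         query: Search query
--
--     Returns:
--         List of (company, count) tuples matching the query
--     """
--     if not companies:
--         return []
--
--     query_lower = query.lower()
--     matches = []
--
--     for company, count in companies.items():
--         if query_lower in company.lower():
--             matches.append((company, count))
--
--     return sorted(matches, key=lambda x: x[1], reverse=True)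
-- ===== SOURCE B (Python) =====
-- def search_companies(companies, query):
--     """Bucket matches by count in a dict, then emit buckets in descending count order."""
--     query_lower = query.lower()
--     buckets = {}
--     for company, count in companies.items():
--         if query_lower in company.lower():
--             buckets.setdefault(count, []).append((company, count))
--     result = []
--     for count in sorted(buckets, reverse=True):
--         result.extend(buckets[count])
--     return result
-- ===== Notes on version B (the rewrite author's own statement) =====
-- stated objective: alternative
-- what changed: B replaces A's comparison sort of the matches by a bucket grouping: matches are grouped into a dict keyed by count, only the distinct counts are sorted descending, and buckets are concatenated in that order (stability comes from per-bucket insertion order, not a stable sort).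
import Mathlib
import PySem

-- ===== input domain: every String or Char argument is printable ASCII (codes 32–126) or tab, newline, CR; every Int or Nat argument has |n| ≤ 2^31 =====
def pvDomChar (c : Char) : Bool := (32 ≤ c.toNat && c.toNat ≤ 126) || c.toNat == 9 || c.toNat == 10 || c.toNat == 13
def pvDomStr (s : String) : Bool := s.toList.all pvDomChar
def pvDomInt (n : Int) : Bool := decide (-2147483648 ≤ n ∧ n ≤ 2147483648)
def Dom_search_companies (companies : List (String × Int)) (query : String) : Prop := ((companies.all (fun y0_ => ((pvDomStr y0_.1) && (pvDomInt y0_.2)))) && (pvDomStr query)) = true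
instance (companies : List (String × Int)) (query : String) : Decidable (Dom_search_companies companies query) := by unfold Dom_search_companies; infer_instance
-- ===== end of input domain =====

-- B replaces A's comparison sort of the matches by dict bucketing on the count plus a sort of the distinct counts only (objective: alternative).

-- ===== PORT A =====
-- port of A: guard on empty, accumulate matches in order, then stable sort by count descending
def search_companies (companies : List (String × Int)) (query : String) : List (String × Int) :=
  if companies = [] then []
  else
    let query_lower := PySem.Str.lower query
    let matched := companies.foldl
      (fun acc c => if PySem.Str.isIn query_lower (PySem.Str.lower c.1) then acc ++ [c] else acc) []
    PySem.List.sorted matched (fun x => x.2) true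

-- ===== PORT B =====
-- port of B: group matches into a dict keyed by count ('setdefault(k, []).append(v)' = 'modify k [] (· ++ [v])'),
-- then extend the result with each bucket, taking the distinct counts in descending order
def search_companies_alt (companies : List (String × Int)) (query : String) : List (String × Int) :=
  let query_lower := PySem.Str.lower query
  let buckets := companies.foldl
    (fun d c => if PySem.Str.isIn query_lower (PySem.Str.lower c.1)
                then d.modify c.2 [] (· ++ [c]) else d)
    PySem.Dict.empty
  (PySem.List.sorted buckets.keys (fun k => k) true).foldl
    (fun result k => result ++ buckets.getD k []) []

-- ===== PRECONDITION & SPEC =====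
def Spec_search_companies (companies : List (String × Int)) (query : String) (out : List (String × Int)) : Prop := out = search_companies_alt companies query
instance (companies : List (String × Int)) (query : String) (out : List (String × Int)) : Decidable (Spec_search_companies companies query out) := by unfold Spec_search_companies; infer_instance

-- ===== CLAIM (what is proved, stated in full; the proofs are below) =====
def Claim_equal_search_companies : Prop := ∀ (companies : List (String × Int)) (query : String), Dom_search_companies companies query → Spec_search_companies companies query (search_companies companies query)

-- ===== LEMMAS AND PROOFS =====

-- a fold with an 'if' guard is a fold over the filtered list
lemma foldl_if_eq_foldl_filter {α β : Type} (p : α → Bool) (g : β → α → β) (l : List α) (d : β) :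
    l.foldl (fun d c => if p c then g d c else d) d = (l.filter p).foldl g d := by
  induction l generalizing d with
  | nil => rfl
  | cons x t ih => by_cases h : p x <;> simp [h, ih]

-- insertBy passes over a prefix it does not beat
lemma insertBy_append_not_before {α : Type} (before : α → α → Bool) (x : α) (A S : List α)
    (h : ∀ a ∈ A, before x a = false) :
    PySem.List.insertBy before x (A ++ S) = A ++ PySem.List.insertBy before x S := by
  induction A with
  | nil => rfl
  | cons a t ih =>
    simp [PySem.List.insertBy, h a (List.mem_cons_self), ih (fun b hb => h b (List.mem_cons_of_mem _ hb))]

-- insertBy puts x in front when it beats every element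
lemma insertBy_of_forall_before {α : Type} (before : α → α → Bool) (x : α) (ys : List α)
    (h : ∀ y ∈ ys, before x y = true) :
    PySem.List.insertBy before x ys = x :: ys := by
  cases ys with
  | nil => rfl
  | cons y t => simp [PySem.List.insertBy, h y (List.mem_cons_self)]

-- extracting the maximal-key bucket from a descending stable sort
lemma sorted_rev_extract_max {α : Type} (key : α → Int) (K : Int) (m : List α)
    (hK : ∀ x ∈ m, key x ≤ K) :
    PySem.List.sorted m key true =
      m.filter (fun x => key x == K) ++
        PySem.List.sorted (m.filter (fun x => !(key x == K))) key true := by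
  induction m using List.reverseRecOn with
  | nil => rfl
  | append_singleton t x ih =>
    have hKt : ∀ y ∈ t, key y ≤ K := fun y hy => hK y (List.mem_append_left _ hy)
    have hKx : key x ≤ K := hK x (List.mem_append_right _ (List.mem_cons_self))
    rw [PySem.List.sorted_rev_eq_foldl_insertBy, List.foldl_append]
    simp only [List.foldl_cons, List.foldl_nil]
    rw [← PySem.List.sorted_rev_eq_foldl_insertBy, ih hKt]
    by_cases hx : key x = K
    · -- x joins the end of the max bucket, before the strictly smaller rest
      have h1 : ∀ a ∈ t.filter (fun y => key y == K),
          (fun a b => decide (key b < key a)) x a = false := by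
        intro a ha
        have := (List.mem_filter.mp ha).2
        simp only [beq_iff_eq] at this
        simp [this, hx]
      have h2 : ∀ s ∈ PySem.List.sorted (t.filter (fun y => !(key y == K))) key true,
          (fun a b => decide (key b < key a)) x s = true := by
        intro s hs
        have hsm := (PySem.List.mem_sorted _ _ _ _).mp hs
        have hne := (List.mem_filter.mp hsm).2
        have hle := hKt s (List.mem_filter.mp hsm).1
        simp only [Bool.not_eq_eq_eq_not, Bool.not_true, beq_eq_false_iff_ne] at hne
        simp only [decide_eq_true_iff, hx]
        omega
      rw [insertBy_append_not_before _ _ _ _ h1, insertBy_of_forall_before _ _ _ h2]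
      simp [List.filter_append, hx]
    · -- key x < K: x skips the whole max bucket and is inserted into the rest
      have h1 : ∀ a ∈ t.filter (fun y => key y == K),
          (fun a b => decide (key b < key a)) x a = false := by
        intro a ha
        have := (List.mem_filter.mp ha).2
        simp only [beq_iff_eq] at this
        simp only [decide_eq_false_iff_not, this, not_lt]
        omega
      rw [insertBy_append_not_before _ _ _ _ h1]
      have hfilt : (t ++ [x]).filter (fun y => !(key y == K)) =
          t.filter (fun y => !(key y == K)) ++ [x] := by
        simp [List.filter_append, hx]
      rw [hfilt, PySem.List.sorted_rev_eq_foldl_insertBy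
            (t.filter (fun y => !(key y == K)) ++ [x]), List.foldl_append]
      simp only [List.foldl_cons, List.foldl_nil, ← PySem.List.sorted_rev_eq_foldl_insertBy]
      simp [List.filter_append, hx]

-- pointwise-equal bucket functions give the same concatenation
lemma flatMap_congr_mem {α β : Type} (l : List α) (f g : α → List β)
    (h : ∀ x ∈ l, f x = g x) : l.flatMap f = l.flatMap g := by
  induction l with
  | nil => rfl
  | cons x t ih =>
    simp only [List.flatMap_cons, h x List.mem_cons_self,
      ih (fun y hy => h y (List.mem_cons_of_mem _ hy))]

-- the descending stable sort is the concatenation of the buckets of a strictly descending key list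
lemma sorted_rev_eq_flatMap_buckets {α : Type} (key : α → Int) (ks : List Int) (m : List α)
    (hmem : ∀ x ∈ m, key x ∈ ks) (hsorted : ks.Pairwise (fun a b => b < a)) :
    PySem.List.sorted m key true = ks.flatMap (fun k => m.filter (fun x => key x == k)) := by
  induction ks generalizing m with
  | nil =>
    have hm : m = [] := by
      cases m with
      | nil => rfl
      | cons y t => exact absurd (hmem y List.mem_cons_self) (List.not_mem_nil)
    subst hm; rfl
  | cons k ks' ih =>
    rw [List.pairwise_cons] at hsorted
    obtain ⟨hlt, hp⟩ := hsorted
    have hK : ∀ x ∈ m, key x ≤ k := by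
      intro x hx
      rcases List.mem_cons.mp (hmem x hx) with h | h
      · exact le_of_eq h
      · exact le_of_lt (hlt _ h)
    rw [sorted_rev_extract_max key k m hK]
    have hmem' : ∀ x ∈ m.filter (fun x => !(key x == k)), key x ∈ ks' := by
      intro x hx
      obtain ⟨hxm, hne⟩ := List.mem_filter.mp hx
      simp only [Bool.not_eq_eq_eq_not, Bool.not_true, beq_eq_false_iff_ne] at hne
      rcases List.mem_cons.mp (hmem x hxm) with h | h
      · exact absurd h hne
      · exact h
    rw [ih _ hmem' hp]
    simp only [List.flatMap_cons]
    congr 1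
    apply flatMap_congr_mem
    intro j hj
    have hjk : j < k := hlt j hj
    rw [List.filter_filter]
    apply List.filter_congr
    intro x _
    by_cases h : key x = j
    · simp [h]; omega
    · simp [h]

-- ===== VERDICT (by name: the statement is the Claim_ definition above) =====
theorem search_companies_spec : Claim_equal_search_companies := by
  intro companies query _
  unfold Spec_search_companies search_companies search_companies_alt
  cases hc : companies with
  | nil => rfl
  | cons c cs =>
    simp only [if_neg (by simp : ¬ (c :: cs = []))]
    rw [PySem.List.foldl_append_if_eq_filter]
    simp only [List.nil_append]
    rw [foldl_if_eq_foldl_filter]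
    set p := fun c : String × Int =>
      PySem.Str.isIn (PySem.Str.lower query) (PySem.Str.lower c.1) with hp
    set m := (c :: cs).filter p with hm
    have hfold : m.foldl (fun d c => d.modify c.2 [] (· ++ [c])) PySem.Dict.empty =
        (m.map (fun c => (c.2, c))).foldl
          (fun d q => d.modify q.1 [] (· ++ [q.2])) PySem.Dict.empty := by
      rw [List.foldl_map]
    rw [hfold]
    set buckets := (m.map (fun c => (c.2, c))).foldl
      (fun d q => d.modify q.1 [] (· ++ [q.2])) PySem.Dict.empty with hb
    have hgetD : ∀ j : Int, buckets.getD j [] = m.filter (fun x => x.2 == j) := by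
      intro j
      rw [hb, PySem.Dict.getD_foldl_modify_append, PySem.Dict.getD_empty]
      rw [List.filter_map]
      simp [Function.comp_def]
    have hkeys : buckets.keys = PySem.List.dedup (m.map (fun x => x.2)) := by
      rw [hb, PySem.Dict.keys_foldl_modify_key]
      simp [PySem.Set.update, PySem.Set.ofList_eq_foldl, PySem.Dict.keys_empty, Function.comp_def]
    set ks := PySem.List.sorted buckets.keys (fun k => k) true with hks
    have hmem : ∀ x ∈ m, x.2 ∈ ks := by
      intro x hx
      rw [hks, PySem.List.mem_sorted, hkeys, PySem.List.mem_dedup]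
      exact List.mem_map_of_mem hx
    have hnd : ks.Nodup := by
      refine (PySem.List.sorted_perm _ _ _).nodup_iff.mpr ?_
      rw [hkeys]
      exact PySem.List.nodup_dedup _
    have hdesc : ks.Pairwise (fun a b => b < a) := by
      have h1 := PySem.List.sorted_pairwise_rev (xs := buckets.keys) (key := fun k => k)
      have := List.Pairwise.and h1 hnd
      exact this.imp (fun h => lt_of_le_of_ne h.1 (fun e => h.2 e.symm))
    rw [PySem.List.foldl_append_eq_flatMap, List.nil_append]
    rw [sorted_rev_eq_flatMap_buckets (fun x => x.2) ks m hmem hdesc]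
    exact flatMap_congr_mem _ _ _ (fun j _ => (hgetD j).symm)
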